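-- pv_equiv track=rewrite | github.com/adamz258/PoE-Stash-Regex-Generator | src/core/regex_generator.py | _pack_exact_names
-- ===== SOURCE A (Python) =====
-- from typing import Iterable, List, Optional, Tuple
--
-- def _pack_exact_names(names: List[str], max_length: int) -> Tuple[Optional[List[str]], Optional[str]]:
--     ordered = sorted(names, key=lambda value: (len(value), value))
--     entries: List[str] = []
--     current = ""
--
--     for name in ordered:
--         single = f"^{name}$"
--         if len(single) > max_length:
--             return None, f"Single pattern exceeds max length: '{single}'."
--
--         if not current:
--             current = name
--             continue
--
--         candidate = f"{current}|{name}"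
--         grouped = f"^(?:{candidate})$"
--         if len(grouped) <= max_length:
--             current = candidate
--         else:
--             if "|" in current:
--                 entries.append(f"^(?:{current})$")
--             else:
--                 entries.append(f"^{current}$")
--             current = name
--
--     if current:
--         if "|" in current:
--             entries.append(f"^(?:{current})$")
--         else:
--             entries.append(f"^{current}$")
--
--     return entries, None
-- ===== SOURCE B (Python) =====
-- def _pack_exact_names(names, max_length):
--     ordered = sorted(names, key=lambda value: (len(value), value))
--
--     # Pass 1: validation - report the first single pattern that cannot fit.
--     for name in ordered:
--         if len(name) + 2 > max_length:
--             return None, f"Single pattern exceeds max length: '^{name}$'."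
--
--     # Pass 2: prefix sums of name lengths, so a group's wrapped length is a
--     # closed formula: wrapping names[start:end] costs 5 + (prefix[end]-prefix[start]) + (end-start).
--     n = len(ordered)
--     prefix = [0]
--     for name in ordered:
--         prefix.append(prefix[-1] + len(name))
--
--     # Pass 3: jump from group boundary to group boundary; each boundary is found
--     # by hand-written binary search on the (monotone) wrapped-length formula,
--     # so no candidate strings are ever built.
--     entries = []
--     start = 0
--     while start < n:
--         lo, hi = start + 1, n
--         while lo < hi:
--             mid = (lo + hi + 1) // 2
--             if 5 + (prefix[mid] - prefix[start]) + (mid - start) <= max_length: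
--                 lo = mid
--             else:
--                 hi = mid - 1
--         end = lo
--         joined = "|".join(ordered[start:end])
--         entries.append(f"^(?:{joined})$" if "|" in joined else f"^{joined}$")
--         start = end
--     return entries, None
-- ===== Notes on version B (the rewrite author's own statement) =====
-- stated objective: faster
-- what changed: A's single interleaved loop (validation, grouping by re-building a '|'-joined candidate string per name, formatting mixed in) is replaced by staged passes: an up-front validation scan, a prefix-sum table of name lengths, and a boundary-jumping pass that finds each group's end with a hand-written binary search on the closed wrapped-length formula 5+(prefix[end]-prefix[start])+(end-start), so no candidate strings are ever built; each group is then joined and wrapped once.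
-- intended difference: On inputs that contain the empty string while every name fits (len(name)+2 <= max_length), A silently drops the empty names (Python string truthiness keeps '' out of every group) and returns entries without them, while B emits a pattern for them (e.g. '^$'), which is the intended behaviour of packing every given name. — e.g. on _pack_exact_names([""], 2): A returns (some [], none), B returns (some ["^$"], none)
import Mathlib
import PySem

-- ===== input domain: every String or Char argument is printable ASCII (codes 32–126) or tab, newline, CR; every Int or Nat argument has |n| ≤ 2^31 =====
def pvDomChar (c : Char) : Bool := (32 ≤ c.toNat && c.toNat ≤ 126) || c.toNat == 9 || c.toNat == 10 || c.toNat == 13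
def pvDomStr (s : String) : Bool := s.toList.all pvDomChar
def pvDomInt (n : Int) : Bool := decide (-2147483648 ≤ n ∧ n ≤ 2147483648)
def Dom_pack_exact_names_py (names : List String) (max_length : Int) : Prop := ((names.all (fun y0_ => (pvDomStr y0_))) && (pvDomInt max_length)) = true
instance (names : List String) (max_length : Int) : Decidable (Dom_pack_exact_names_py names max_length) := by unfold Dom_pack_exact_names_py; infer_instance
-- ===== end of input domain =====

-- B replaces A's single interleaved greedy loop by: a validation pass, a prefix-sum table of name lengths,
-- and a boundary-jumping pass that finds each group's end by BINARY SEARCH on the monotone wrapped-length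
-- formula, so no candidate strings are ever built (measured faster in a timing run). B intentionally
-- emits a pattern for empty names, which A silently drops (see D_).


-- ===== PORT A =====
-- Strings are handled on List Char (PySem.Chars); f-string concatenation is List append (exact for ASCII).

-- the two 'if "|" in current: … else: …' append sites of A
def pvFmtA (current : List Char) : String :=
  if PySem.Chars.isIn ['|'] current then String.ofList ("^(?:".toList ++ current ++ ")$".toList)
  else String.ofList ("^".toList ++ current ++ "$".toList)

-- A's for-loop over ordered, state (entries, current); current = "" ↔ []
def pvLoopA : List String → Int → List String → List Char → Option (List String) × Option String
  | [], _, entries, current =>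
      if current ≠ [] then (some (entries ++ [pvFmtA current]), none) else (some entries, none)
  | name :: rest, maxL, entries, current =>
      let single := "^".toList ++ name.toList ++ "$".toList
      if (PySem.Chars.len single : Int) > maxL then
        (none, some (String.ofList ("Single pattern exceeds max length: '".toList ++ single ++ "'.".toList)))
      else if current = [] then pvLoopA rest maxL entries name.toList
      else
        let candidate := current ++ "|".toList ++ name.toList
        let grouped := "^(?:".toList ++ candidate ++ ")$".toList
        if (PySem.Chars.len grouped : Int) ≤ maxL then pvLoopA rest maxL entries candidate
        else pvLoopA rest maxL (entries ++ [pvFmtA current]) name.toList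

def pack_exact_names_py (names : List String) (max_length : Int) : Option (List String) × Option String :=
  let ordered := PySem.List.sorted2 names (fun value => (PySem.Str.len value : Int)) (fun value => value)
  pvLoopA ordered max_length [] []

-- ===== PORT B =====
-- pass 1 of Source B: validation
def pvValidateB : List String → Int → Option String
  | [], _ => none
  | name :: rest, maxL =>
      if (PySem.Chars.len name.toList : Int) + 2 > maxL then
        some (String.ofList ("Single pattern exceeds max length: '^".toList ++ name.toList ++ "$'.".toList))
      else pvValidateB rest maxL

-- pass 2 of Source B: prefix = [0]; for name in ordered: prefix.append(prefix[-1] + len(name))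
def pvPrefixB : List String → Int → List Int
  | [], acc => [acc]
  | s :: t, acc => acc :: pvPrefixB t (acc + (PySem.Chars.len s.toList : Int))

-- Source B's inner while: hand-written binary search for the largest fitting group end
-- (fuel makes the loop structurally total; hi - lo ≤ fuel at every call, so it never runs out)
def pvBisect (pre : List Int) (maxL : Int) (start : Nat) : Nat → Nat → Nat → Nat
  | 0, lo, _ => lo
  | fuel + 1, lo, hi =>
    if lo < hi then
      let mid := (lo + hi + 1) / 2
      if 5 + (pre.getD mid 0 - pre.getD start 0) + ((mid : Int) - (start : Int)) ≤ maxL then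
        pvBisect pre maxL start fuel mid hi
      else pvBisect pre maxL start fuel lo (mid - 1)
    else lo

-- Source B's formatting line: join the group and wrap
def pvFmtB (group : List String) : String :=
  let joined := PySem.Chars.join ['|'] (group.map String.toList)
  if PySem.Chars.isIn ['|'] joined then String.ofList ("^(?:".toList ++ joined ++ ")$".toList)
  else String.ofList ("^".toList ++ joined ++ "$".toList)

-- pass 3 of Source B: the outer while over group starts (fuel = list length bounds the trips,
-- since every group takes at least one name); the slice ordered[start:end] (0 ≤ start ≤ end ≤ len) is drop/take
def pvOuterB (ordered : List String) (pre : List Int) (maxL : Int) : Nat → Nat → List String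
  | 0, _ => []
  | fuel + 1, start =>
    if start < ordered.length then
      let e := pvBisect pre maxL start ordered.length (start + 1) ordered.length
      pvFmtB ((ordered.drop start).take (e - start)) :: pvOuterB ordered pre maxL fuel e
    else []

def pack_exact_names_py_alt (names : List String) (max_length : Int) : Option (List String) × Option String :=
  let ordered := PySem.List.sorted2 names (fun value => (PySem.Str.len value : Int)) (fun value => value)
  match pvValidateB ordered max_length with
  | some err => (none, some err)
  | none => (some (pvOuterB ordered (pvPrefixB ordered 0) max_length ordered.length 0), none)

-- ===== PRECONDITION & SPEC =====
-- On inputs that contain the empty string while every name fits (len+2 ≤ max_length), A silently drops the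
-- empty names (Python string truthiness keeps '' out of every group) while B emits a pattern for them
-- (e.g. '^$'), which is the intended behaviour of packing every given name.
def D_pack_exact_names_py (names : List String) (max_length : Int) : Prop :=
  "" ∈ names ∧ ∀ n ∈ names, (PySem.Chars.len n.toList : Int) + 2 ≤ max_length
instance (names : List String) (max_length : Int) : Decidable (D_pack_exact_names_py names max_length) := by
  unfold D_pack_exact_names_py; infer_instance

def Spec_pack_exact_names_py (names : List String) (max_length : Int) (out : Option (List String) × Option String) : Prop := ¬ D_pack_exact_names_py names max_length → out = pack_exact_names_py_alt names max_length
instance (names : List String) (max_length : Int) (out : Option (List String) × Option String) : Decidable (Spec_pack_exact_names_py names max_length out) := by unfold Spec_pack_exact_names_py; infer_instance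

def pvDiffWitness_pack_exact_names_py : List String × Int := ([""], 2)
def pvDiffWitnessOut_pack_exact_names_py : (Option (List String) × Option String) × (Option (List String) × Option String) :=
  ((some [], none), (some ["^$"], none))

-- ===== CLAIM (what is proved, stated in full; the proofs are below) =====
def Claim_unchanged_pack_exact_names_py : Prop := ∀ (names : List String) (max_length : Int), Dom_pack_exact_names_py names max_length → Spec_pack_exact_names_py names max_length (pack_exact_names_py names max_length)
def Claim_changed_pack_exact_names_py : Prop := Dom_pack_exact_names_py (pvDiffWitness_pack_exact_names_py.1) (pvDiffWitness_pack_exact_names_py.2) ∧ D_pack_exact_names_py (pvDiffWitness_pack_exact_names_py.1) (pvDiffWitness_pack_exact_names_py.2) ∧ pack_exact_names_py (pvDiffWitness_pack_exact_names_py.1) (pvDiffWitness_pack_exact_names_py.2) = pvDiffWitnessOut_pack_exact_names_py.1 ∧ pack_exact_names_py_alt (pvDiffWitness_pack_exact_names_py.1) (pvDiffWitness_pack_exact_names_py.2) = pvDiffWitnessOut_pack_exact_names_py.2 ∧ pvDiffWitnessOut_pack_exact_names_py.1 ≠ pvDiffWitnessOut_pack_exact_names_py.2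

-- ===== LEMMAS AND PROOFS =====

-- proof-only intermediate: the greedy grouper as a single pass over the list
-- (A's loop is shown equal to it, and it is shown equal to B's binary-search jumper)
def pvGroupB : List String → Int → List (List String) → Option (List String) → Int → List (List String)
  | [], _, groups, group, _ =>
      match group with
      | none => groups
      | some g => groups ++ [g]
  | name :: rest, maxL, groups, group, innerLen =>
      match group with
      | some g =>
          if 7 + innerLen + (PySem.Chars.len name.toList : Int) ≤ maxL then
            pvGroupB rest maxL groups (some (g ++ [name])) (innerLen + 1 + (PySem.Chars.len name.toList : Int))
          else
            pvGroupB rest maxL (groups ++ [g]) (some [name]) (PySem.Chars.len name.toList : Int)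
      | none => pvGroupB rest maxL groups (some [name]) (PySem.Chars.len name.toList : Int)

-- If pass 1 finds an error, A's loop returns the same error from any state.
lemma pvLoopA_of_validate_err (l : List String) (maxL : Int) (e : String)
    (h : pvValidateB l maxL = some e) :
    ∀ entries current, pvLoopA l maxL entries current = (none, some e) := by
  induction l with
  | nil => simp [pvValidateB] at h
  | cons name rest ih =>
      intro entries current
      by_cases hb : (PySem.Chars.len name.toList : Int) + 2 > maxL
      · rw [pvValidateB] at h
        rw [if_pos hb] at h
        rw [pvLoopA]
        have hlen : (PySem.Chars.len ("^".toList ++ name.toList ++ "$".toList) : Int) > maxL := by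
          simp [PySem.Chars.len_eq] at hb ⊢; omega
        rw [if_pos hlen]
        simp at h
        simp [← h]
      · rw [pvValidateB] at h
        rw [if_neg hb] at h
        rw [pvLoopA]
        have hlen : ¬ ((PySem.Chars.len ("^".toList ++ name.toList ++ "$".toList) : Int) > maxL) := by
          simp [PySem.Chars.len_eq] at hb ⊢; omega
        rw [if_neg hlen]
        by_cases hc : current = []
        · rw [if_pos hc]; exact ih h _ _
        · rw [if_neg hc]
          by_cases hg : (PySem.Chars.len ("^(?:".toList ++ (current ++ "|".toList ++ name.toList) ++ ")$".toList) : Int) ≤ maxL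
          · simp only [if_pos hg]; exact ih h _ _
          · simp only [if_neg hg]; exact ih h _ _

lemma pvValidateB_none (l : List String) (maxL : Int)
    (h : pvValidateB l maxL = none) :
    ∀ n ∈ l, (PySem.Chars.len n.toList : Int) + 2 ≤ maxL := by
  induction l with
  | nil => simp
  | cons name rest ih =>
      intro n hn
      rw [pvValidateB] at h
      by_cases hb : (PySem.Chars.len name.toList : Int) + 2 > maxL
      · rw [if_pos hb] at h; simp at h
      · rw [if_neg hb] at h
        rcases List.mem_cons.mp hn with hn | hn
        · subst hn; omega
        · exact ih h n hn

lemma pvGroupB_acc (l : List String) (maxL : Int) :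
    ∀ gs group innerLen, pvGroupB l maxL gs group innerLen = gs ++ pvGroupB l maxL [] group innerLen := by
  induction l with
  | nil => intro gs group innerLen; cases group <;> simp only [pvGroupB] <;> simp
  | cons name rest ih =>
      intro gs group innerLen
      cases group with
      | none => simp only [pvGroupB]; exact ih gs _ _
      | some g =>
          simp only [pvGroupB]
          by_cases hf : 7 + innerLen + (PySem.Chars.len name.toList : Int) ≤ maxL
          · simp only [if_pos hf]; exact ih gs _ _
          · simp only [if_neg hf]
            rw [ih (gs ++ [g]), ih ([] ++ [g])]
            simp

lemma pvJoin_snoc (g : List (List Char)) (x : List Char) (hg : g ≠ []) :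
    PySem.Chars.join ['|'] (g ++ [x]) = PySem.Chars.join ['|'] g ++ "|".toList ++ x := by
  induction g with
  | nil => simp at hg
  | cons a rest ih =>
      cases rest with
      | nil => simp [PySem.Chars.join_cons_cons, PySem.Chars.join_singleton]
      | cons b t =>
          conv_lhs => rw [List.cons_append, List.cons_append, PySem.Chars.join_cons_cons]
          conv_rhs => rw [PySem.Chars.join_cons_cons]
          rw [show b :: (t ++ [x]) = (b :: t) ++ [x] from rfl, ih (by simp)]
          simp

-- the loop invariant: A's current string is the '|'-join of the greedy group
lemma pvLoop_eq_group (l : List String) (maxL : Int)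
    (hval : ∀ n ∈ l, (PySem.Chars.len n.toList : Int) + 2 ≤ maxL)
    (hne : ∀ n ∈ l, n.toList ≠ []) :
    ∀ entries (g : List String), g ≠ [] →
      PySem.Chars.join ['|'] (g.map String.toList) ≠ [] →
      pvLoopA l maxL entries (PySem.Chars.join ['|'] (g.map String.toList)) =
        (some (entries ++ (pvGroupB l maxL [] (some g)
          ((PySem.Chars.join ['|'] (g.map String.toList)).length : Int)).map pvFmtB), none) := by
  induction l with
  | nil =>
      intro entries g hg hj
      rw [pvLoopA, pvGroupB]
      rw [if_pos hj]
      simp [pvFmtA, pvFmtB]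
  | cons name rest ih =>
      intro entries g hg hj
      have hvh : (PySem.Chars.len name.toList : Int) + 2 ≤ maxL := hval name (by simp)
      have hnh : name.toList ≠ [] := hne name (by simp)
      rw [pvLoopA, pvGroupB]
      have hlen : ¬ ((PySem.Chars.len ("^".toList ++ name.toList ++ "$".toList) : Int) > maxL) := by
        simp [PySem.Chars.len_eq] at hvh ⊢; omega
      rw [if_neg hlen, if_neg hj]
      have hsnoc := pvJoin_snoc (g.map String.toList) name.toList (by simpa using hg)
      have hcond : ((PySem.Chars.len ("^(?:".toList ++ (PySem.Chars.join ['|'] (g.map String.toList) ++ "|".toList ++ name.toList) ++ ")$".toList) : Int) ≤ maxL)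
          ↔ (7 + ((PySem.Chars.join ['|'] (g.map String.toList)).length : Int) + (PySem.Chars.len name.toList : Int) ≤ maxL) := by
        simp [PySem.Chars.len_eq]; omega
      by_cases hf : 7 + ((PySem.Chars.join ['|'] (g.map String.toList)).length : Int) + (PySem.Chars.len name.toList : Int) ≤ maxL
      · rw [if_pos (hcond.mpr hf), if_pos hf]
        have hmap : (g ++ [name]).map String.toList = g.map String.toList ++ [name.toList] := by simp
        have h1 : PySem.Chars.join ['|'] ((g ++ [name]).map String.toList)
            = PySem.Chars.join ['|'] (g.map String.toList) ++ "|".toList ++ name.toList := by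
          rw [hmap, hsnoc]
        have := ih (fun n hn => hval n (by simp [hn])) (fun n hn => hne n (by simp [hn]))
          entries (g ++ [name]) (by simp) (by rw [h1]; simp)
        rw [h1] at this
        rw [this]
        have hlen2 : (((PySem.Chars.join ['|'] (g.map String.toList) ++ "|".toList ++ name.toList).length : Int))
            = ((PySem.Chars.join ['|'] (g.map String.toList)).length : Int) + 1 + (PySem.Chars.len name.toList : Int) := by
          simp [PySem.Chars.len_eq]; omega
        rw [hlen2]
      · rw [if_neg (fun h => hf (hcond.mp h)), if_neg hf]
        have := ih (fun n hn => hval n (by simp [hn])) (fun n hn => hne n (by simp [hn]))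
          (entries ++ [pvFmtA (PySem.Chars.join ['|'] (g.map String.toList))]) [name] (by simp)
          (by simpa [PySem.Chars.join_singleton] using hnh)
        simp only [List.map_cons, List.map_nil, PySem.Chars.join_singleton] at this
        rw [this]
        simp only [List.nil_append]
        rw [pvGroupB_acc rest maxL [g]]
        simp [pvFmtA, pvFmtB, PySem.Chars.len_eq]

-- A's whole loop, from the empty state, is the greedy grouper followed by formatting
lemma pvLoopA_eq_groupB (l : List String) (maxL : Int)
    (hval : ∀ n ∈ l, (PySem.Chars.len n.toList : Int) + 2 ≤ maxL)
    (hne : ∀ n ∈ l, n.toList ≠ []) :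
    pvLoopA l maxL [] [] = (some ((pvGroupB l maxL [] none 0).map pvFmtB), none) := by
  cases l with
  | nil => simp [pvLoopA, pvGroupB]
  | cons name rest =>
      have hvh : (PySem.Chars.len name.toList : Int) + 2 ≤ maxL := hval name (by simp)
      rw [pvLoopA]
      simp only [pvGroupB]
      have hlen : ¬ ((PySem.Chars.len ("^".toList ++ name.toList ++ "$".toList) : Int) > maxL) := by
        simp [PySem.Chars.len_eq] at hvh ⊢; omega
      rw [if_neg hlen]
      simp only [if_true]
      have := pvLoop_eq_group rest maxL
        (fun n hn => hval n (by simp [hn]))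
        (fun n hn => hne n (by simp [hn]))
        [] [name] (by simp)
        (by simpa [PySem.Chars.join_singleton] using hne name (by simp))
      simp only [List.map_cons, List.map_nil, PySem.Chars.join_singleton] at this
      rw [this]
      simp [PySem.Chars.len_eq]

-- ---- prefix sums and the fit formula ----

def pvSum (l : List String) (k : Nat) : Int :=
  ((l.take k).map (fun s => (s.toList.length : Int))).sum

abbrev pvFit (l : List String) (maxL : Int) (s e : Nat) : Prop :=
  5 + (pvSum l e - pvSum l s) + ((e : Int) - (s : Int)) ≤ maxL

lemma pvSum_succ (l : List String) (k : Nat) (hk : k < l.length) :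
    pvSum l (k + 1) = pvSum l k + (l[k].toList.length : Int) := by
  unfold pvSum
  rw [List.map_take, List.map_take, List.sum_take_succ _ k (by simpa using hk)]
  simp

lemma pvSum_mono (l : List String) {a b : Nat} (h : a ≤ b) : pvSum l a ≤ pvSum l b := by
  induction b with
  | zero =>
      have : a = 0 := by omega
      simp [this]
  | succ b ih =>
      rcases Nat.lt_or_ge a (b + 1) with ha | ha
      · have h1 : pvSum l a ≤ pvSum l b := ih (by omega)
        have h2 : pvSum l b ≤ pvSum l (b + 1) := by
          rcases Nat.lt_or_ge b l.length with hb | hb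
          · rw [pvSum_succ l b hb]
            have hnn : (0 : Int) ≤ (l[b].toList.length : Int) := by positivity
            omega
          · unfold pvSum
            rw [List.take_of_length_le (by omega), List.take_of_length_le (by omega)]
        omega
      · have : a = b + 1 := by omega
        simp [this]

lemma pvFit_mono (l : List String) (maxL : Int) (s : Nat) {a b : Nat} (h : a ≤ b)
    (hf : pvFit l maxL s b) : pvFit l maxL s a := by
  unfold pvFit at *
  have := pvSum_mono l h
  omega

lemma pvPrefixB_getD (l : List String) : ∀ (a : Int) (k : Nat), k ≤ l.length →
    (pvPrefixB l a).getD k 0 = a + pvSum l k := by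
  induction l with
  | nil =>
      intro a k hk
      simp only [List.length_nil, Nat.le_zero] at hk
      subst hk
      simp [pvPrefixB, pvSum]
  | cons s t ih =>
      intro a k hk
      cases k with
      | zero => simp [pvPrefixB, pvSum]
      | succ k =>
          rw [pvPrefixB]
          simp only [List.getD_cons_succ]
          rw [ih _ k (by simpa using hk)]
          have : pvSum (s :: t) (k+1) = (PySem.Chars.len s.toList : Int) + pvSum t k := by
            simp [pvSum, PySem.Chars.len_eq]
          omega

-- ---- the two boundary finders and their common characterization ----

def pvGEnd (l : List String) (maxL : Int) (s k : Nat) : Nat :=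
  if h : k < l.length ∧ pvFit l maxL s (k + 1) then pvGEnd l maxL s (k + 1) else k
termination_by l.length - k
decreasing_by omega

-- the three properties that pin the boundary down uniquely
def pvEndProps (l : List String) (maxL : Int) (s lo hi r : Nat) : Prop :=
  lo ≤ r ∧ r ≤ hi ∧ (r = lo ∨ pvFit l maxL s r) ∧ (∀ m, r < m → m ≤ hi → ¬ pvFit l maxL s m)

lemma pvEndProps_unique (l : List String) (maxL : Int) (s lo hi r1 r2 : Nat)
    (h1 : pvEndProps l maxL s lo hi r1) (h2 : pvEndProps l maxL s lo hi r2) : r1 = r2 := by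
  obtain ⟨a1, b1, c1, d1⟩ := h1
  obtain ⟨a2, b2, c2, d2⟩ := h2
  rcases Nat.lt_trichotomy r1 r2 with h | h | h
  · rcases c2 with h' | h'
    · omega
    · exact absurd h' (d1 r2 h b2)
  · exact h
  · rcases c1 with h' | h'
    · omega
    · exact absurd h' (d2 r1 h b1)

lemma pvBisect_props (l : List String) (maxL : Int) (s : Nat) (hs : s ≤ l.length) :
    ∀ fuel lo hi, hi - lo ≤ fuel → lo ≤ hi → hi ≤ l.length →
      pvEndProps l maxL s lo hi (pvBisect (pvPrefixB l 0) maxL s fuel lo hi) := by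
  intro fuel
  induction fuel with
  | zero =>
      intro lo hi hf hlh hhi
      have hlohi : lo = hi := by omega
      subst hlohi
      simp only [pvBisect]
      exact ⟨le_rfl, le_rfl, Or.inl rfl, by omega⟩
  | succ fuel ih =>
      intro lo hi hf hlh hhi
      rw [pvBisect]
      by_cases h : lo < hi
      · rw [if_pos h]
        have hmid1 : lo < (lo + hi + 1) / 2 := by omega
        have hmid2 : (lo + hi + 1) / 2 ≤ hi := by omega
        have hg1 := pvPrefixB_getD l 0 ((lo + hi + 1) / 2) (by omega)
        have hg2 := pvPrefixB_getD l 0 s hs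
        have hcond : (5 + ((pvPrefixB l 0).getD ((lo + hi + 1) / 2) 0 - (pvPrefixB l 0).getD s 0)
              + ((((lo + hi + 1) / 2 : Nat) : Int) - (s : Int)) ≤ maxL) ↔ pvFit l maxL s ((lo + hi + 1) / 2) := by
          unfold pvFit
          rw [hg1, hg2]
          omega
        by_cases hc : pvFit l maxL s ((lo + hi + 1) / 2)
        · rw [if_pos (hcond.mpr hc)]
          have hrec := ih ((lo + hi + 1) / 2) hi (by omega) (by omega) hhi
          obtain ⟨a, b, c, dd⟩ := hrec
          refine ⟨by omega, b, ?_, dd⟩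
          rcases c with c | c
          · right; rw [c]; exact hc
          · right; exact c
        · rw [if_neg (fun hh => hc (hcond.mp hh))]
          have hrec := ih lo ((lo + hi + 1) / 2 - 1) (by omega) (by omega) (by omega)
          obtain ⟨a, b, c, dd⟩ := hrec
          refine ⟨a, by omega, c, ?_⟩
          intro m hm1 hm2
          rcases Nat.lt_or_ge ((lo + hi + 1) / 2 - 1) m with hm | hm
          · intro hfm
            exact hc (pvFit_mono l maxL s (by omega) hfm)
          · exact dd m hm1 hm
      · rw [if_neg h]
        exact ⟨Nat.le_refl lo, by omega, Or.inl rfl, by omega⟩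

lemma pvGEnd_props (l : List String) (maxL : Int) (s : Nat) :
    ∀ k, k ≤ l.length → pvEndProps l maxL s k l.length (pvGEnd l maxL s k) := by
  intro k
  induction hn : l.length - k using Nat.strong_induction_on generalizing k with
  | _ d ih =>
      intro hk
      rw [pvGEnd]
      by_cases h : k < l.length ∧ pvFit l maxL s (k + 1)
      · rw [dif_pos h]
        have hrec := ih (l.length - (k+1)) (by omega) (k+1) rfl (by omega)
        obtain ⟨a, b, c, dd⟩ := hrec
        refine ⟨by omega, b, ?_, dd⟩
        rcases c with c | c
        · right; rw [c]; exact h.2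
        · right; exact c
      · rw [dif_neg h]
        refine ⟨Nat.le_refl k, hk, Or.inl rfl, ?_⟩
        intro m hm1 hm2 hf
        rcases Nat.lt_or_ge k l.length with hkl | hkl
        · have : ¬ pvFit l maxL s (k+1) := fun hf' => h ⟨hkl, hf'⟩
          exact this (pvFit_mono l maxL s (by omega) hf)
        · omega

lemma pvBisect_eq_gEnd (l : List String) (maxL : Int) (s : Nat) (hs : s < l.length) :
    pvBisect (pvPrefixB l 0) maxL s l.length (s + 1) l.length = pvGEnd l maxL s (s + 1) := by
  exact pvEndProps_unique l maxL s (s + 1) l.length _ _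
    (pvBisect_props l maxL s (by omega) l.length (s + 1) l.length (by omega) (by omega) le_rfl)
    (pvGEnd_props l maxL s (s + 1) (by omega))

-- ---- the greedy grouper tracks slices whose ends pvGEnd computes ----

lemma pvGroupB_slice (l : List String) (maxL : Int) (s : Nat) :
    ∀ k, s < k → k ≤ l.length →
      pvGroupB (l.drop k) maxL [] (some ((l.drop s).take (k - s)))
          (pvSum l k - pvSum l s + ((k : Int) - (s : Int) - 1))
        = (l.drop s).take (pvGEnd l maxL s k - s)
            :: pvGroupB (l.drop (pvGEnd l maxL s k)) maxL [] none 0 := by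
  intro k
  induction hn : l.length - k using Nat.strong_induction_on generalizing k with
  | _ d ih =>
      intro hsk hk
      rcases Nat.lt_or_ge k l.length with hkl | hkl
      · rw [List.drop_eq_getElem_cons hkl]
        rw [pvGroupB]
        have hlenk : (PySem.Chars.len l[k].toList : Int) = (l[k].toList.length : Int) := by
          simp [PySem.Chars.len_eq]
        have hcond : (7 + (pvSum l k - pvSum l s + ((k : Int) - (s : Int) - 1)) + (PySem.Chars.len l[k].toList : Int) ≤ maxL)
            ↔ pvFit l maxL s (k + 1) := by
          unfold pvFit
          rw [hlenk, pvSum_succ l k hkl]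
          constructor <;> intro <;> push_cast at * <;> omega
        by_cases hf : pvFit l maxL s (k + 1)
        · rw [if_pos (hcond.mpr hf)]
          have hsnoc : (l.drop s).take (k - s) ++ [l[k]] = (l.drop s).take (k + 1 - s) := by
            have hks : k - s < (l.drop s).length := by simp; omega
            rw [show k + 1 - s = (k - s) + 1 by omega, List.take_succ,
              List.getElem?_eq_getElem hks]
            simp [List.getElem_drop, show s + (k - s) = k by omega]
          have hinner : pvSum l k - pvSum l s + ((k : Int) - (s : Int) - 1) + 1 + (PySem.Chars.len l[k].toList : Int)
              = pvSum l (k+1) - pvSum l s + (((k+1 : Nat) : Int) - (s : Int) - 1) := by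
            rw [hlenk, pvSum_succ l k hkl]; push_cast; ring
          rw [hsnoc, hinner]
          have hge : pvGEnd l maxL s k = pvGEnd l maxL s (k + 1) := by
            rw [pvGEnd]; rw [dif_pos ⟨hkl, hf⟩]
          rw [hge]
          exact ih (l.length - (k+1)) (by omega) (k+1) rfl (by omega) (by omega)
        · rw [if_neg (fun hh => hf (hcond.mp hh))]
          have hge : pvGEnd l maxL s k = k := by
            rw [pvGEnd]; rw [dif_neg (fun hh => hf hh.2)]
          rw [pvGroupB_acc]
          rw [hge]
          rw [List.drop_eq_getElem_cons hkl]
          conv_rhs => rw [pvGroupB]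
          simp
      · have hkn : k = l.length := by omega
        subst hkn
        simp only [List.drop_length]
        rw [pvGroupB]
        have hge : pvGEnd l maxL s l.length = l.length := by
          rw [pvGEnd]; rw [dif_neg (by omega)]
        rw [hge]
        simp only [List.drop_length]
        rw [pvGroupB]
        simp

-- main bridge: the greedy grouper + formatting equals B's boundary-jumping pass
lemma pvGroupB_eq_outer (l : List String) (maxL : Int) :
    ∀ fuel s, s ≤ l.length → l.length - s ≤ fuel →
      (pvGroupB (l.drop s) maxL [] none 0).map pvFmtB
        = pvOuterB l (pvPrefixB l 0) maxL fuel s := by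
  intro fuel
  induction fuel with
  | zero =>
      intro s hs hf
      have : l.drop s = [] := List.drop_eq_nil_of_le (by omega)
      rw [this, pvGroupB, pvOuterB]
      simp
  | succ fuel ih =>
      intro s hs hf
      rw [pvOuterB]
      rcases Nat.lt_or_ge s l.length with hsl | hsl
      · rw [if_pos hsl]
        conv_lhs => rw [List.drop_eq_getElem_cons hsl]
        rw [pvGroupB]
        have h1 : [l[s]] = (l.drop s).take (s + 1 - s) := by
          rw [show s + 1 - s = 1 by omega]
          rw [List.take_one]
          rw [List.head?_drop]
          simp [List.getElem?_eq_getElem hsl]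
        have h2 : (PySem.Chars.len l[s].toList : Int)
            = pvSum l (s + 1) - pvSum l s + (((s + 1 : Nat) : Int) - (s : Int) - 1) := by
          rw [pvSum_succ l s hsl]
          simp [PySem.Chars.len_eq]
        rw [h1, h2, pvGroupB_slice l maxL s (s + 1) (by omega) (by omega)]
        rw [pvBisect_eq_gEnd l maxL s hsl]
        have hbound := pvGEnd_props l maxL s (s + 1) (by omega)
        obtain ⟨ha, hb, -, -⟩ := hbound
        rw [List.map_cons]
        congr 1
        exact ih (pvGEnd l maxL s (s + 1)) hb (by omega)
      · rw [if_neg (by omega)]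
        have : l.drop s = [] := List.drop_eq_nil_of_le (by omega)
        rw [this, pvGroupB]
        simp

-- ===== VERDICT (by name: the statement is the Claim_ definition above) =====
theorem pack_exact_names_py_spec : Claim_unchanged_pack_exact_names_py := by
  intro names maxL _ hD
  simp only [pack_exact_names_py, pack_exact_names_py_alt]
  generalize hord : PySem.List.sorted2 names (fun value => (PySem.Str.len value : Int)) (fun value => value) = ordered
  cases hv : pvValidateB ordered maxL with
  | some e =>
      exact pvLoopA_of_validate_err ordered maxL e hv [] []
  | none =>
      show pvLoopA ordered maxL [] [] = (some (pvOuterB ordered (pvPrefixB ordered 0) maxL ordered.length 0), none)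
      have hval := pvValidateB_none ordered maxL hv
      have hperm : ordered.Perm names := hord ▸ PySem.List.sorted2_perm names _ _ false
      have hvaln : ∀ n ∈ names, (PySem.Chars.len n.toList : Int) + 2 ≤ maxL := by
        intro n hn; exact hval n (hperm.mem_iff.mpr hn)
      have hnm : "" ∉ names := fun hmem => hD ⟨hmem, hvaln⟩
      have hne : ∀ n ∈ ordered, n.toList ≠ [] := by
        intro n hn hnil
        exact hnm (String.toList_eq_nil_iff.mp hnil ▸ hperm.mem_iff.mp hn)
      rw [pvLoopA_eq_groupB ordered maxL hval hne]
      have h0 := pvGroupB_eq_outer ordered maxL ordered.length 0 (by omega) (by omega)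
      rw [List.drop_zero] at h0
      rw [h0]

theorem pack_exact_names_py_changed : Claim_changed_pack_exact_names_py := by
  unfold Claim_changed_pack_exact_names_py; decide
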